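-- pv_equiv track=rewrite | github.com/ValeryiaDomokurova/HomeWork4 | homeworks/hw8/sequence/hw8_solution.py | ascending_sequence
-- ===== SOURCE A (Python) =====
-- def ascending_sequence(arr):
--     n = len(arr)
--     if n <= 2:
--         return True
--     count = 0
--     for i in range(1, n):
--         if arr[i] <= arr[i - 1]:
--             count += 1
--             if count > 1:
--                 return False
--             if i >= 2 and arr[i] <= arr[i - 2]:
--                 if i < n - 1 and arr[i + 1] <= arr[i - 1]:
--                     return False
--     return True
-- ===== SOURCE B (Python) =====
-- def ascending_sequence(arr):
--     def strict(seq):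
--         return all(x < y for x, y in zip(seq, seq[1:]))
--     for i in range(1, len(arr)):
--         if arr[i] <= arr[i - 1]:
--             return strict(arr[:i - 1] + arr[i:]) or strict(arr[:i] + arr[i + 1:])
--     return True
-- ===== Notes on version B (the rewrite author's own statement) =====
-- stated objective: simpler
-- what changed: Replaces A's violation counter with inlined junction comparisons by a reusable strict-ascent predicate applied to the two single-element-removal candidates at the first violation.
import Mathlib
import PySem

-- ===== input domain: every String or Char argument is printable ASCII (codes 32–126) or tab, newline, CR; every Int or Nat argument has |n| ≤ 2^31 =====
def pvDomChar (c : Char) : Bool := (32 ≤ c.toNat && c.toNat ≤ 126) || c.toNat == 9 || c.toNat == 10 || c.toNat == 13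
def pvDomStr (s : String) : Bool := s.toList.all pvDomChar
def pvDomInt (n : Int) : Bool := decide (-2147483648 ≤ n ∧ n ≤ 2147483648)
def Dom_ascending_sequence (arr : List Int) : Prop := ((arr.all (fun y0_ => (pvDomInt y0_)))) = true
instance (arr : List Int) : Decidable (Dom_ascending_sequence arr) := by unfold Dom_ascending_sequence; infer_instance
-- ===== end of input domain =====

-- B is a simpler decomposition of the same check: a reusable strict-ascent predicate applied to
-- the two single-element-removal candidates at the first violation (same return value as A).

-- ===== PORT A =====
-- A's for-loop over range(1, n) carrying the violation counter `count`; every Python index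
-- used here (i, i-1, i-2, i+1) is in range when read, so `List.getD … 0` is exact.
def pvLoopA (arr : List Int) (n i : Nat) (count : Int) : Bool :=
  if h : i < n then
    if arr.getD i 0 ≤ arr.getD (i - 1) 0 then
      let count' := count + 1
      if count' > 1 then false
      else
        if 2 ≤ i ∧ arr.getD i 0 ≤ arr.getD (i - 2) 0 then
          if i < n - 1 ∧ arr.getD (i + 1) 0 ≤ arr.getD (i - 1) 0 then false
          else pvLoopA arr n (i + 1) count'
        else pvLoopA arr n (i + 1) count'
    else pvLoopA arr n (i + 1) count
  else true
termination_by n - i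

def ascending_sequence (arr : List Int) : Bool :=
  let n := arr.length
  if n ≤ 2 then true
  else pvLoopA arr n 1 0

-- ===== PORT B =====
-- all(x < y for x, y in zip(seq, seq[1:]))
def pvStrict (seq : List Int) : Bool := (seq.zip (seq.drop 1)).all (fun p => decide (p.1 < p.2))

-- Source B's for-loop: scan for the first violation; slices arr[:i-1]+arr[i:] and arr[:i]+arr[i+1:]
-- have nonnegative bounds here, so List.take/List.drop are exact.
def pvFindFix (arr : List Int) (i : Nat) : Bool :=
  if h : i < arr.length then
    if arr.getD i 0 ≤ arr.getD (i - 1) 0 then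
      pvStrict (arr.take (i - 1) ++ arr.drop i) || pvStrict (arr.take i ++ arr.drop (i + 1))
    else pvFindFix arr (i + 1)
  else true
termination_by arr.length - i

def ascending_sequence_alt (arr : List Int) : Bool :=
  pvFindFix arr 1

-- ===== PRECONDITION & SPEC =====
def Spec_ascending_sequence (arr : List Int) (out : Bool) : Prop := out = ascending_sequence_alt arr
instance (arr : List Int) (out : Bool) : Decidable (Spec_ascending_sequence arr out) := by unfold Spec_ascending_sequence; infer_instance

-- ===== CLAIM (what is proved, stated in full; the proofs are below) =====
def Claim_equal_ascending_sequence : Prop := ∀ (arr : List Int), Dom_ascending_sequence arr → Spec_ascending_sequence arr (ascending_sequence arr)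

-- ===== LEMMAS AND PROOFS =====

-- "no violation at any index in [a, b)"
def pvNoV (arr : List Int) (a b : Nat) : Prop :=
  ∀ k, a ≤ k → k < b → arr.getD (k - 1) 0 < arr.getD k 0

lemma pvStrict_iff (l : List Int) :
    pvStrict l = true ↔ ∀ k, 1 ≤ k → k < l.length → l.getD (k-1) 0 < l.getD k 0 := by
  unfold pvStrict
  rw [List.all_eq_true]
  constructor
  · intro h k hk1 hk2
    have hj : k - 1 < (l.zip (l.drop 1)).length := by
      simp [List.length_zip]; omega
    have hmem := List.getElem_mem hj
    have h2 := h _ hmem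
    have he : (l.zip (l.drop 1))[k-1] = (l[k-1]'(by omega), (l.drop 1)[k-1]'(by simp; omega)) :=
      List.getElem_zip
    rw [he] at h2
    simp only [decide_eq_true_eq] at h2
    have hd : (l.drop 1)[k-1]'(by simp; omega) = l[1 + (k-1)]'(by omega) := List.getElem_drop
    rw [List.getD_eq_getElem _ _ (by omega : k - 1 < l.length),
        List.getD_eq_getElem _ _ hk2]
    have : 1 + (k - 1) = k := by omega
    rw [hd] at h2
    simp only [this] at h2
    exact h2
  · intro h x hx
    obtain ⟨j, hj, rfl⟩ := List.mem_iff_getElem.mp hx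
    have hjl : j < l.length - 1 := by simpa [List.length_zip] using hj
    rw [List.getElem_zip]
    simp only [decide_eq_true_eq]
    have hd : (l.drop 1)[j]'(by simp; omega) = l[1 + j]'(by omega) := List.getElem_drop
    rw [hd]
    have := h (j+1) (by omega) (by omega)
    rw [List.getD_eq_getElem _ _ (by omega : (j+1) - 1 < l.length),
        List.getD_eq_getElem _ _ (by omega : j+1 < l.length)] at this
    simpa [Nat.add_comm] using this

lemma removed_length (arr : List Int) (p : Nat) (hp : p < arr.length) :
    (arr.take p ++ arr.drop (p + 1)).length = arr.length - 1 := by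
  simp; omega

lemma removed_getD (arr : List Int) (p k : Nat) (hp : p < arr.length) :
    (arr.take p ++ arr.drop (p + 1)).getD k 0
      = if k < p then arr.getD k 0 else arr.getD (k + 1) 0 := by
  by_cases h : k < p
  · simp only [if_pos h]
    rw [List.getD_eq_getElem?_getD, List.getD_eq_getElem?_getD]
    rw [List.getElem?_append_left (by simp; omega)]
    rw [List.getElem?_take]
    simp [h]
  · simp only [if_neg h]
    rw [List.getD_eq_getElem?_getD, List.getD_eq_getElem?_getD]
    rw [List.getElem?_append_right (by simp; omega)]
    rw [List.getElem?_drop]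
    congr 2
    simp
    omega

lemma strict_removed (arr : List Int) (p : Nat) (hp : p < arr.length) :
    pvStrict (arr.take p ++ arr.drop (p + 1)) = true ↔
      (pvNoV arr 1 p ∧ (1 ≤ p → p + 1 < arr.length → arr.getD (p - 1) 0 < arr.getD (p + 1) 0)
        ∧ pvNoV arr (p + 2) arr.length) := by
  rw [pvStrict_iff, removed_length arr p hp]
  constructor
  · intro h
    refine ⟨?_, ?_, ?_⟩
    · intro k hk1 hk2
      have := h k hk1 (by omega)
      rwa [removed_getD arr p _ hp, removed_getD arr p _ hp, if_pos (by omega : k - 1 < p),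
        if_pos (by omega : k < p)] at this
    · intro h1 h2
      have := h p (by omega) (by omega)
      rwa [removed_getD arr p _ hp, removed_getD arr p _ hp, if_pos (by omega : p - 1 < p),
        if_neg (by omega : ¬ p < p)] at this
    · intro k hk1 hk2
      have := h (k - 1) (by omega) (by omega)
      rw [removed_getD arr p _ hp, removed_getD arr p _ hp, if_neg (by omega : ¬ k - 1 - 1 < p),
        if_neg (by omega : ¬ k - 1 < p)] at this
      have e1 : k - 1 - 1 + 1 = k - 1 := by omega
      have e2 : k - 1 + 1 = k := by omega
      rwa [e1, e2] at this
  · rintro ⟨h1, h2, h3⟩ k hk1 hk2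
    rw [removed_getD arr p _ hp, removed_getD arr p _ hp]
    by_cases hkp : k < p
    · rw [if_pos (by omega), if_pos hkp]
      exact h1 k hk1 hkp
    · rw [if_neg (by omega : ¬ k < p)]
      by_cases hkp1 : k - 1 < p
      · rw [if_pos hkp1]
        -- k = p here
        have hkeq : k = p := by omega
        subst hkeq
        exact h2 (by omega) (by omega)
      · rw [if_neg hkp1]
        have := h3 (k + 1) (by omega) (by omega)
        have e1 : k + 1 - 1 = k := by omega
        rw [e1] at this
        have e2 : k - 1 + 1 = k := by omega
        rw [e2]
        exact this

lemma loopA_one (arr : List Int) : ∀ d j, arr.length - j = d →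
    (pvLoopA arr arr.length j 1 = true ↔ pvNoV arr j arr.length) := by
  intro d
  induction d with
  | zero =>
    intro j hj
    rw [pvLoopA]
    simp only [dif_neg (by omega : ¬ j < arr.length)]
    constructor
    · intro _ k hk1 hk2; omega
    · intro _; trivial
  | succ d ih =>
    intro j hj
    rw [pvLoopA]
    simp only [dif_pos (by omega : j < arr.length)]
    by_cases hv : arr.getD j 0 ≤ arr.getD (j - 1) 0
    · simp only [if_pos hv]
      norm_num
      intro hno
      have := hno j le_rfl (by omega)
      omega
    · simp only [if_neg hv]
      rw [ih (j+1) (by omega)]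
      constructor
      · intro h k hk1 hk2
        by_cases hkj : k = j
        · subst hkj; omega
        · exact h k (by omega) hk2
      · intro h k hk1 hk2
        exact h k (by omega) hk2

lemma small_strict (l : List Int) (h : l.length ≤ 1) : pvStrict l = true := by
  rw [pvStrict_iff]
  intro k hk1 hk2; omega

lemma core (arr : List Int) (i : Nat) (h1 : 1 ≤ i) (hn : i < arr.length)
    (hv : arr.getD i 0 ≤ arr.getD (i - 1) 0) (hpre : pvNoV arr 1 i) :
    (if 2 ≤ i ∧ arr.getD i 0 ≤ arr.getD (i - 2) 0 then
      if i < arr.length - 1 ∧ arr.getD (i + 1) 0 ≤ arr.getD (i - 1) 0 then false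
      else pvLoopA arr arr.length (i + 1) 1
     else pvLoopA arr arr.length (i + 1) 1)
      = (pvStrict (arr.take (i - 1) ++ arr.drop i) || pvStrict (arr.take i ++ arr.drop (i + 1))) := by
  have hc1 : arr.take (i-1) ++ arr.drop i = arr.take (i-1) ++ arr.drop ((i-1) + 1) := by
    rw [(by omega : i - 1 + 1 = i)]
  have hL := loopA_one arr (arr.length - (i+1)) (i+1) rfl
  -- characterizations of the two candidates
  have hs1 : pvStrict (arr.take (i - 1) ++ arr.drop i) = true ↔
      ((1 ≤ i - 1 → i < arr.length → arr.getD (i - 1 - 1) 0 < arr.getD i 0)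
        ∧ pvNoV arr (i + 1) arr.length) := by
    rw [hc1, strict_removed arr (i-1) (by omega)]
    have e : i - 1 + 1 = i := by omega
    rw [e]
    constructor
    · rintro ⟨_, h2, h3⟩
      refine ⟨h2, ?_⟩
      intro k hk1 hk2
      exact h3 k (by omega) hk2
    · rintro ⟨h2, h3⟩
      refine ⟨?_, h2, ?_⟩
      · intro k hk1 hk2
        exact hpre k hk1 (by omega)
      · intro k hk1 hk2
        exact h3 k (by omega) hk2
  have hs2 : pvStrict (arr.take i ++ arr.drop (i + 1)) = true ↔
      ((i + 1 < arr.length → arr.getD (i - 1) 0 < arr.getD (i + 1) 0)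
        ∧ pvNoV arr (i + 2) arr.length) := by
    rw [strict_removed arr i (by omega)]
    constructor
    · rintro ⟨_, h2, h3⟩
      exact ⟨h2 h1, h3⟩
    · rintro ⟨h2, h3⟩
      refine ⟨?_, fun _ => h2, h3⟩
      intro k hk1 hk2
      exact hpre k hk1 (by omega)
  by_cases hrest : pvNoV arr (i+1) arr.length
  · -- no later violation: both sides reduce to the junction condition
    have hA : pvLoopA arr arr.length (i+1) 1 = true := hL.mpr hrest
    have hrest2 : pvNoV arr (i+2) arr.length := by
      intro k hk1 hk2
      exact hrest k (by omega) hk2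
    by_cases hj : 2 ≤ i ∧ arr.getD i 0 ≤ arr.getD (i - 2) 0
    · rw [if_pos hj]
      by_cases hj2 : i < arr.length - 1 ∧ arr.getD (i + 1) 0 ≤ arr.getD (i - 1) 0
      · rw [if_pos hj2]
        symm
        rw [Bool.or_eq_false_iff]
        constructor
        · rw [← Bool.not_eq_true, hs1]
          rintro ⟨hx, -⟩
          have := hx (by omega) hn
          have e : i - 1 - 1 = i - 2 := by omega
          rw [e] at this
          omega
        · rw [← Bool.not_eq_true, hs2]
          rintro ⟨hx, -⟩
          have := hx (by omega)
          omega
      · rw [if_neg hj2, hA]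
        symm
        rw [Bool.or_eq_true]
        by_cases hlast : i < arr.length - 1
        · right
          rw [hs2]
          exact ⟨fun _ => by omega, hrest2⟩
        · right
          rw [hs2]
          exact ⟨fun hx => absurd hx (by omega), hrest2⟩
    · rw [if_neg hj, hA]
      symm
      rw [Bool.or_eq_true]
      left
      rw [hs1]
      refine ⟨fun hk1 _ => ?_, hrest⟩
      have e : i - 1 - 1 = i - 2 := by omega
      rw [e]
      omega
  · -- a later violation exists: everything is false
    obtain ⟨k, hk1, hk2, hk3⟩ : ∃ k, i + 1 ≤ k ∧ k < arr.length ∧ arr.getD k 0 ≤ arr.getD (k-1) 0 := by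
      by_contra hcon
      simp only [not_exists, not_and, not_le] at hcon
      refine hrest ?_
      intro k hka hkb
      exact hcon k hka hkb
    have hA : pvLoopA arr arr.length (i+1) 1 = false := by
      rw [← Bool.not_eq_true, hL]
      intro hno
      exact absurd (hno k hk1 hk2) (by omega)
    have hB1 : pvStrict (arr.take (i - 1) ++ arr.drop i) = false := by
      rw [← Bool.not_eq_true, hs1]
      rintro ⟨-, hno⟩
      exact absurd (hno k hk1 hk2) (by omega)
    have hB2 : pvStrict (arr.take i ++ arr.drop (i + 1)) = false := by
      rw [← Bool.not_eq_true, hs2]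
      rintro ⟨hjoin, hno⟩
      by_cases hke : k = i + 1
      · subst hke
        have := hjoin hk2
        have e : i + 1 - 1 = i := by omega
        rw [e] at hk3
        omega
      · exact absurd (hno k (by omega) hk2) (by omega)
    rw [hB1, hB2]
    simp only [Bool.or_false]
    split_ifs with h h2
    · rfl
    · exact hA
    · exact hA

lemma main_lemma (arr : List Int) :
    ∀ d j, arr.length - j = d → 1 ≤ j → pvNoV arr 1 j →
      pvLoopA arr arr.length j 0 = pvFindFix arr j := by
  intro d
  induction d with
  | zero =>
    intro j hj h1 hpre
    rw [pvLoopA, pvFindFix]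
    simp [dif_neg (by omega : ¬ j < arr.length)]
  | succ d ih =>
    intro j hj h1 hpre
    rw [pvLoopA, pvFindFix]
    simp only [dif_pos (by omega : j < arr.length)]
    by_cases hv : arr.getD j 0 ≤ arr.getD (j - 1) 0
    · simp only [if_pos hv]
      have h01 : ¬ ((0 : Int) + 1 > 1) := by norm_num
      rw [if_neg h01]
      exact core arr j h1 (by omega) hv hpre
    · simp only [if_neg hv]
      refine ih (j+1) (by omega) (by omega) ?_
      intro k hk1 hk2
      by_cases hkj : k = j
      · subst hkj; omega
      · exact hpre k hk1 (by omega)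

lemma small_true (arr : List Int) (h : arr.length ≤ 2) : pvFindFix arr 1 = true := by
  rw [pvFindFix]
  by_cases h1 : 1 < arr.length
  · simp only [dif_pos h1]
    by_cases hv : arr.getD 1 0 ≤ arr.getD (1 - 1) 0
    · simp only [if_pos hv]
      rw [Bool.or_eq_true]
      left
      apply small_strict
      simp
      omega
    · simp only [if_neg hv]
      rw [pvFindFix]
      simp [dif_neg (by omega : ¬ 1 + 1 < arr.length)]
  · simp [dif_neg h1]

-- ===== VERDICT (by name: the statement is the Claim_ definition above) =====
theorem ascending_sequence_spec : Claim_equal_ascending_sequence := by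
  intro arr _
  unfold Spec_ascending_sequence ascending_sequence ascending_sequence_alt
  by_cases h : arr.length ≤ 2
  · simp [h, small_true arr h]
  · simp only [h, if_false]
    exact main_lemma arr (arr.length - 1) 1 rfl le_rfl (by intro k hk1 hk2; omega)
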